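-- pv_equiv track=rewrite | github.com/Lancelot1106/HU_AI_Blok_C | pythonProject/Structured Programming.py | binair
-- ===== SOURCE A (Python) =====
-- def binair(lijst):
--     nullen = 0
--     enen = 0
--
--     for i in range(len(lijst)):
--         if lijst[i] == 0:
--             nullen += 1
--         elif lijst[i] == 1:
--             enen += 1
--         else:
--             return ("foutieve lijst \n")
--
--     if nullen > enen:
--         return(f"Er moeten meer enen dan nullen in de lijst staan, momenteel staan er {nullen} nullen en {enen} enen \n")
--     elif nullen > 12:
--         return(f"Er mogen max 12 nullen in de lijst staan, momenteel staan er {nullen} nullen in de lijst \n")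
--     else:
--         return(f"Er staan {nullen} nullen en {enen} enen in de lijst \n")
-- ===== SOURCE B (Python) =====
-- def binair(lijst):
--     if any(lijst[i] != 0 and lijst[i] != 1 for i in range(len(lijst))):
--         return ("foutieve lijst \n")
--     nullen = sum(1 for i in range(len(lijst)) if lijst[i] == 0)
--     enen = len(lijst) - nullen
--     if nullen > enen:
--         return(f"Er moeten meer enen dan nullen in de lijst staan, momenteel staan er {nullen} nullen en {enen} enen \n")
--     elif nullen > 12:
--         return(f"Er mogen max 12 nullen in de lijst staan, momenteel staan er {nullen} nullen in de lijst \n")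
--     else:
--         return(f"Er staan {nullen} nullen en {enen} enen in de lijst \n")
-- ===== Notes on version B (the rewrite author's own statement) =====
-- stated objective: alternative
-- what changed: Replaced the single validate-and-count loop with two phases: a short-circuiting any() validity check, then counting zeros with sum() and deriving the ones count as len - nullen instead of a second counter.
import Mathlib
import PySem

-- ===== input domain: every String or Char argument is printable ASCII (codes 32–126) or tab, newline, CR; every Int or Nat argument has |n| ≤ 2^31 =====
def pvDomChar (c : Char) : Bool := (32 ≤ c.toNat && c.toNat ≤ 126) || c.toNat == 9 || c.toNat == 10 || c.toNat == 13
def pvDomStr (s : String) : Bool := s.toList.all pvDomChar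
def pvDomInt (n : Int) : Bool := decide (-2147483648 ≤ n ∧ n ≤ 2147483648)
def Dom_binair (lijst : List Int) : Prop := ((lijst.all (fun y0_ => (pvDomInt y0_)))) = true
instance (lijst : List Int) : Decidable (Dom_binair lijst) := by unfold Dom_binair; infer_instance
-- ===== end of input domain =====

-- B validates first with a short-circuit scan, then counts zeros and derives the ones count as len - nullen (alternative decomposition, same cost).


-- ===== PORT A =====
def binairLoop (l : List Int) (nullen enen : Int) : String :=
  match l with
  | [] =>
    if nullen > enen then
      "Er moeten meer enen dan nullen in de lijst staan, momenteel staan er " ++ PySem.Int.toStr nullen ++ " nullen en " ++ PySem.Int.toStr enen ++ " enen \n"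
    else if nullen > 12 then
      "Er mogen max 12 nullen in de lijst staan, momenteel staan er " ++ PySem.Int.toStr nullen ++ " nullen in de lijst \n"
    else
      "Er staan " ++ PySem.Int.toStr nullen ++ " nullen en " ++ PySem.Int.toStr enen ++ " enen in de lijst \n"
  | x :: xs =>
    if x = 0 then binairLoop xs (nullen + 1) enen
    else if x = 1 then binairLoop xs nullen (enen + 1)
    else "foutieve lijst \n"

def binair (lijst : List Int) : String := binairLoop lijst 0 0

-- ===== PORT B =====  (validate first with a short-circuit scan, then count zeros, derive ones as len - nullen)
def binair_alt (lijst : List Int) : String :=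
  if lijst.any (fun x => !(x == 0) && !(x == 1)) then "foutieve lijst \n"
  else
    let nullen : Int := ((lijst.filter (fun x => x == 0)).length : Int)
    let enen : Int := (lijst.length : Int) - nullen
    if nullen > enen then
      "Er moeten meer enen dan nullen in de lijst staan, momenteel staan er " ++ PySem.Int.toStr nullen ++ " nullen en " ++ PySem.Int.toStr enen ++ " enen \n"
    else if nullen > 12 then
      "Er mogen max 12 nullen in de lijst staan, momenteel staan er " ++ PySem.Int.toStr nullen ++ " nullen in de lijst \n"
    else
      "Er staan " ++ PySem.Int.toStr nullen ++ " nullen en " ++ PySem.Int.toStr enen ++ " enen in de lijst \n"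

-- ===== PRECONDITION & SPEC =====
def Spec_binair (lijst : List Int) (out : String) : Prop := out = binair_alt lijst
instance (lijst : List Int) (out : String) : Decidable (Spec_binair lijst out) := by unfold Spec_binair; infer_instance

-- ===== CLAIM (what is proved, stated in full; the proofs are below) =====
def Claim_equal_binair : Prop := ∀ (lijst : List Int), Dom_binair lijst → Spec_binair lijst (binair lijst)

-- ===== LEMMAS AND PROOFS =====
theorem binairLoop_char (l : List Int) (n e : Int) :
    binairLoop l n e =
      if l.any (fun x => !(x == 0) && !(x == 1)) then "foutieve lijst \n"
      else binairLoop [] (n + ((l.filter (fun x => x == 0)).length : Int))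
                         (e + ((l.filter (fun x => x == 1)).length : Int)) := by
  induction l generalizing n e with
  | nil => simp
  | cons x xs ih =>
    by_cases h0 : x = 0
    · subst h0
      simp [binairLoop, ih, List.any_cons]
      ring_nf
    · by_cases h1 : x = 1
      · subst h1
        simp [binairLoop, ih, List.any_cons]
        ring_nf
      · simp [binairLoop, List.any_cons, h0, h1]

theorem count01 (l : List Int) (h : l.any (fun x => !(x == 0) && !(x == 1)) = false) :
    ((l.filter (fun x => x == 1)).length : Int)
      = (l.length : Int) - ((l.filter (fun x => x == 0)).length : Int) := by
  induction l with
  | nil => simp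
  | cons x xs ih =>
    simp only [List.any_cons, Bool.or_eq_false_iff] at h
    obtain ⟨hx, hxs⟩ := h
    have := ih hxs
    by_cases h0 : x = 0
    · subst h0; simp; omega
    · have h1 : x = 1 := by
        simp [h0] at hx; exact hx
      subst h1; simp; omega

-- ===== VERDICT (by name: the statement is the Claim_ definition above) =====
theorem binair_spec : Claim_equal_binair := by
  intro lijst _
  unfold Spec_binair binair binair_alt
  rw [binairLoop_char]
  cases h : lijst.any (fun x => !(x == 0) && !(x == 1)) with
  | true => simp
  | false => simp [binairLoop, count01 lijst h]
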